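-- pv_equiv track=rewrite | github.com/gratisreise/problem-solve | 프로그래머스/1/92334. 신고 결과 받기/신고 결과 받기.py | solution
-- ===== SOURCE A (Python) =====
-- def solution(id_list, report, k):
--     report_name = {}
--     report_count = {}
--
--     for id in id_list:
--         report_name[id] = set()
--         report_count[id] = 0
--
--     # 신고한 유저의 이름저장
--     for s in report:
--         arr = s.split( )
--         report_name[arr[0]].add(arr[1])
--
--     # 신고받은 횟수 카운팅
--     for id in report_name.keys():
--         for report in report_name[id]:
--             report_count[report] += 1
--
--     # 이메일 발송 횟수 세기
--     ret = []
--     for id in report_name.keys():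
--         cnt = 0
--         for name in report_name[id]:
--             if report_count[name] >= k:
--                 cnt += 1
--         ret.append(cnt)
--
--     return ret
-- ===== SOURCE B (Python) =====
-- def solution(id_list, report, k):
--     ids = list(dict.fromkeys(id_list))
--     banned = [u for u in ids
--               if len({r.split()[0] for r in report if r.split()[1] == u}) >= k]
--     return [len({r.split()[1] for r in report
--                  if r.split()[0] == i and r.split()[1] in banned})
--             for i in ids]
-- ===== Notes on version B (the rewrite author's own statement) =====
-- stated objective: simpler
-- what changed: Replaces A's dict-of-sets, counter dict and two nested counting loops by a dict-free per-user recomputation: for each user a set comprehension over the raw report list counts its distinct reporters (giving the banned list), and for each reporter a second comprehension counts its distinct banned targets directly; Pre_ excludes only the inputs on which A raises (IndexError/KeyError).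
import Mathlib
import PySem

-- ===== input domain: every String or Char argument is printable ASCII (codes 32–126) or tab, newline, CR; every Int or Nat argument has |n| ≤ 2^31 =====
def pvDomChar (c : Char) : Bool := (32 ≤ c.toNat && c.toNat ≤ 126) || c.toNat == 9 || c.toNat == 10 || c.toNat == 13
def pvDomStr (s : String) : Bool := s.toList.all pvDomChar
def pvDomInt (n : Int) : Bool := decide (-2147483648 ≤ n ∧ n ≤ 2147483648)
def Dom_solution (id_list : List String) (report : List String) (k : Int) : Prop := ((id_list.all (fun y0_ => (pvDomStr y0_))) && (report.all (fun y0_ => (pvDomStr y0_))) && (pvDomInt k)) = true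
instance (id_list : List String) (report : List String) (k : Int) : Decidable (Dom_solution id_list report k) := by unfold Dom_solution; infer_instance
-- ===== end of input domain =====

-- B replaces A's dict-of-sets, counter dict and nested counting loops by a dict-free
-- per-user brute-force recomputation over the raw report list (simpler; slower on large inputs).
-- Pre_ excludes exactly the inputs on which A raises (IndexError/KeyError).


-- ===== PORT A =====
def solution (id_list : List String) (report : List String) (k : Int) : List Int :=
  let init := id_list.foldl
      (fun (p : PySem.Dict String (PySem.Set String) × PySem.Dict String Int) id =>
        (p.1.insert id PySem.Set.empty, p.2.insert id 0))
      (PySem.Dict.empty, PySem.Dict.empty)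
  let rn := report.foldl
      (fun (rn : PySem.Dict String (PySem.Set String)) s =>
        let arr := PySem.Str.split₀ s
        match arr with
        | a :: b :: _ =>
          match rn.get? a with
          | some st => rn.insert a (PySem.Set.add st b)
          | none => rn           -- Python raises KeyError here (excluded by Pre_)
        | _ => rn)               -- Python raises IndexError here (excluded by Pre_)
      init.1
  let rc := rn.keys.foldl
      (fun (rc : PySem.Dict String Int) id =>
        (rn.getD id PySem.Set.empty).foldl
          (fun (rc : PySem.Dict String Int) name =>
            match rc.get? name with
            | some v => rc.insert name (v + 1)
            | none => rc)        -- Python raises KeyError here (excluded by Pre_)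
          rc)
      init.2
  rn.keys.foldl
    (fun (ret : List Int) id =>
      let cnt := (rn.getD id PySem.Set.empty).foldl
        (fun (cnt : Int) name => if k ≤ rc.getD name 0 then cnt + 1 else cnt) 0
      ret ++ [cnt])
    []

-- ===== PORT B =====
-- r.split()[0] / r.split()[1]; Python raises IndexError on a short line (excluded by Pre_),
-- the getD default is only reachable outside Pre_.
def pvTok0 (s : String) : String := (PySem.Str.split₀ s).getD 0 ""
def pvTok1 (s : String) : String := (PySem.Str.split₀ s).getD 1 ""

def solution_alt (id_list : List String) (report : List String) (k : Int) : List Int :=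
  let ids := PySem.Set.ofList id_list        -- list(dict.fromkeys(id_list))
  let banned := ids.filter (fun u =>
    decide (k ≤ ((PySem.Set.ofList
      ((report.filter (fun r => pvTok1 r == u)).map pvTok0)).length : Int)))
  ids.map (fun i =>
    ((PySem.Set.ofList ((report.filter (fun r =>
        pvTok0 r == i && banned.contains (pvTok1 r))).map pvTok1)).length : Int))

-- ===== PRECONDITION & SPEC =====
-- Pre_ excludes exactly the inputs on which A raises: IndexError on a report line with fewer
-- than two tokens, KeyError on a reporter or reported token that is not in id_list.
def Pre_solution (id_list : List String) (report : List String) (k : Int) : Prop :=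
  ∀ s ∈ report, 2 ≤ (PySem.Str.split₀ s).length ∧
    (PySem.Str.split₀ s).getD 0 "" ∈ id_list ∧ (PySem.Str.split₀ s).getD 1 "" ∈ id_list
instance (id_list : List String) (report : List String) (k : Int) : Decidable (Pre_solution id_list report k) := by unfold Pre_solution; infer_instance
def pvWitness_solution : List String × List String × Int := (["a", "b"], ["a b"], 1)
def Spec_solution (id_list : List String) (report : List String) (k : Int) (out : List Int) : Prop := out = solution_alt id_list report k
instance (id_list : List String) (report : List String) (k : Int) (out : List Int) : Decidable (Spec_solution id_list report k out) := by unfold Spec_solution; infer_instance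

-- ===== CLAIM (what is proved, stated in full; the proofs are below) =====
def Claim_equal_solution : Prop := ∀ (id_list : List String) (report : List String) (k : Int), Dom_solution id_list report k → Pre_solution id_list report k → Spec_solution id_list report k (solution id_list report k)

-- ===== LEMMAS AND PROOFS =====

-- the (reporter, reported) pair a report line denotes (under Pre_ the match always fires)
def pvParse (s : String) : String × String :=
  match PySem.Str.split₀ s with
  | a :: b :: _ => (a, b)
  | _ => ("", "")

-- the deduplicated pair list both programs effectively count over
def pvP (report : List String) : List (String × String) :=
  PySem.Set.ofList (report.map pvParse)

-- how many distinct reporters reported b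
def pvTot (report : List String) (b : String) : Nat :=
  (pvP report).countP (fun p => p.2 == b)

-- the number of result mails user i receives
def pvAns (report : List String) (k : Int) (i : String) : Int :=
  ((pvP report).countP (fun p => p.1 == i && decide (k ≤ (pvTot report p.2 : Int))) : Int)


-- countP respects pointwise equality on members (no such lemma in this Mathlib)
theorem pv_countP_congr {α : Type} (l : List α) (p q : α → Bool)
    (h : ∀ a ∈ l, p a = q a) : l.countP p = l.countP q := by
  induction l with
  | nil => rfl
  | cons a t ih =>
    simp only [List.countP_cons, h a (by simp), ih (fun x hx => h x (by simp [hx]))]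

theorem pv_parse_spec (s : String) (h2 : 2 ≤ (PySem.Str.split₀ s).length) :
    ∃ t, PySem.Str.split₀ s = (pvParse s).1 :: (pvParse s).2 :: t ∧
      (PySem.Str.split₀ s).getD 0 "" = (pvParse s).1 ∧
      (PySem.Str.split₀ s).getD 1 "" = (pvParse s).2 := by
  unfold pvParse
  rcases hs : PySem.Str.split₀ s with _ | ⟨a, _ | ⟨b, t⟩⟩
  · simp [hs] at h2
  · simp [hs] at h2
  · exact ⟨t, by simp⟩

theorem pv_memP (id_list report : List String) (k : Int)
    (h : Pre_solution id_list report k) :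
    ∀ p ∈ pvP report, p.1 ∈ id_list ∧ p.2 ∈ id_list := by
  intro p hp
  rw [pvP, PySem.Set.mem_ofList, List.mem_map] at hp
  obtain ⟨s, hs, rfl⟩ := hp
  obtain ⟨h2, ha, hb⟩ := h s hs
  obtain ⟨t, -, e0, e1⟩ := pv_parse_spec s h2
  exact ⟨e0 ▸ ha, e1 ▸ hb⟩

-- A-SIDE LEMMAS ------------------------------------------------------------

-- one conditional counting pass over a list, incrementing dict entry key p (KeyError branch skipped)
theorem pv_incr_fold {α : Type} (key : α → String) (q : α → Bool) (l : List α)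
    (d : PySem.Dict String Int) (i : String)
    (hd : ∀ p ∈ l, q p = true → d.contains (key p) = true) :
    (l.foldl (fun d p => if q p then
        (match d.get? (key p) with
         | none => d
         | some v => d.insert (key p) (v + 1)) else d) d).getD i 0
      = d.getD i 0 + (l.countP (fun p => key p == i && q p) : Int) := by
  induction l generalizing d with
  | nil => simp
  | cons p t ih =>
    by_cases hq : q p = true
    · have hc := hd p (by simp) hq
      rw [PySem.Dict.contains_eq_isSome_get?] at hc
      obtain ⟨v, hv⟩ := Option.isSome_iff_exists.mp hc
      have hstep : (if q p then
          (match d.get? (key p) with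
           | none => d
           | some v => d.insert (key p) (v + 1)) else d) = d.insert (key p) (v + 1) := by
        simp [hq, hv]
      rw [List.foldl_cons, hstep,
        ih (d.insert (key p) (v + 1)) (fun x hx hqx => by
          rw [PySem.Dict.contains_insert]
          simp [hd x (by simp [hx]) hqx])]
      rw [PySem.Dict.getD_insert, List.countP_cons]
      by_cases hik : i = key p
      · have hv' : d.getD i 0 = v :=
          PySem.Dict.getD_of_get?_eq_some d 0 (by rw [hik]; exact hv)
        have hbeq : (key p == i) = true := by simp [hik]
        rw [if_pos hik, hbeq, hv']
        simp only [hq, Bool.true_and, if_pos]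
        push_cast
        ring
      · have hbeq : (key p == i) = false :=
          beq_eq_false_iff_ne.mpr (fun e => hik e.symm)
        rw [if_neg hik, hbeq]
        simp only [Bool.false_and, Bool.false_eq_true, if_false]
        push_cast
        ring
    · have hstep : (if q p then
          (match d.get? (key p) with
           | none => d
           | some v => d.insert (key p) (v + 1)) else d) = d := by simp [hq]
      rw [List.foldl_cons, hstep, ih d (fun x hx hqx => hd x (by simp [hx]) hqx),
        List.countP_cons]
      simp [hq]

-- unconditional counting pass (A's inner report_count loop; KeyError branch skipped)
theorem pv_incr_fold' (l : List String) (d : PySem.Dict String Int) (b : String)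
    (hd : ∀ n ∈ l, d.contains n = true) :
    (l.foldl (fun d n =>
        match d.get? n with
        | some v => d.insert n (v + 1)
        | none => d) d).getD b 0
      = d.getD b 0 + (l.count b : Int) := by
  have hfn : (fun (d : PySem.Dict String Int) (n : String) =>
      match d.get? n with
      | some v => d.insert n (v + 1)
      | none => d)
      = (fun (d : PySem.Dict String Int) (n : String) => if (fun (_ : String) => true) n then
          (match d.get? n with
           | none => d
           | some v => d.insert n (v + 1)) else d) := by
    funext d n
    cases d.get? n <;> simp
  rw [hfn, pv_incr_fold (fun n => n) (fun _ => true) l d b (fun p hp _ => hd p hp)]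
  simp [List.count]

-- the counting pass never adds or removes keys
theorem pv_incr_contains (l : List String) (d : PySem.Dict String Int) (x : String) :
    (l.foldl (fun d n =>
        match d.get? n with
        | some v => d.insert n (v + 1)
        | none => d) d).contains x = d.contains x := by
  induction l generalizing d with
  | nil => rfl
  | cons n t ih =>
    rw [List.foldl_cons]
    cases hn : d.get? n with
    | none => exact ih d
    | some v =>
      rw [show ((match some v with
          | some v => d.insert n (v + 1)
          | none => d) : PySem.Dict String Int) = d.insert n (v + 1) from rfl,
        ih, PySem.Dict.contains_insert]
      by_cases hx : x = n
      · subst hx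
        rw [PySem.Dict.contains_eq_isSome_get?, hn]
        simp
      · simp [hx]

-- 'd = {i: v0 for i in ids}' (duplicates in ids overwrite in place)
theorem pv_init_keys {ν : Type} (v0 : ν) (ids : List String) :
    (ids.foldl (fun (d : PySem.Dict String ν) i => d.insert i v0) PySem.Dict.empty).keys
      = PySem.Set.ofList ids := by
  rw [PySem.Dict.keys_foldl_insert ids (fun _ _ => v0) PySem.Dict.empty,
    PySem.Dict.keys_empty, PySem.Set.update_nil_left]

theorem pv_init_getD {ν : Type} (v0 dflt : ν) (ids : List String) (i : String) :
    (ids.foldl (fun (d : PySem.Dict String ν) j => d.insert j v0) PySem.Dict.empty).getD i dflt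
      = if i ∈ ids then v0 else dflt := by
  suffices h : ∀ d : PySem.Dict String ν,
      (ids.foldl (fun d j => d.insert j v0) d).getD i dflt
        = if i ∈ ids then v0 else d.getD i dflt by
    rw [h]
    by_cases hi : i ∈ ids <;> simp [hi]
  intro d
  induction ids generalizing d with
  | nil => simp
  | cons j t ih =>
    rw [List.foldl_cons, ih]
    by_cases hit : i ∈ t
    · simp [hit]
    · rw [if_neg hit, PySem.Dict.getD_insert]
      by_cases hij : i = j
      · simp [hij]
      · simp [hij, hit]

theorem pv_init_contains {ν : Type} (v0 : ν) (ids : List String) (i : String) :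
    (ids.foldl (fun (d : PySem.Dict String ν) j => d.insert j v0) PySem.Dict.empty).contains i
      = decide (i ∈ ids) := by
  apply Bool.coe_iff_coe.mp
  rw [PySem.Dict.contains_iff_mem_keys, pv_init_keys]
  simp [PySem.Set.mem_ofList]

-- A's report_name loop computes, per reporter, exactly the reported slice of the pair set
theorem pv_rn_fold (L : List (String × String)) (rn : PySem.Dict String (PySem.Set String))
    (P : PySem.Set (String × String))
    (hK : ∀ p ∈ L, rn.contains p.1 = true)
    (hrel : ∀ i, rn.getD i PySem.Set.empty
      = (P.filter (fun p => p.1 == i)).map (fun p => p.2)) :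
    (L.foldl (fun rn p =>
        match rn.get? p.1 with
        | some st => rn.insert p.1 (PySem.Set.add st p.2)
        | none => rn) rn).keys = rn.keys ∧
    ∀ i, (L.foldl (fun rn p =>
        match rn.get? p.1 with
        | some st => rn.insert p.1 (PySem.Set.add st p.2)
        | none => rn) rn).getD i PySem.Set.empty
      = ((L.foldl PySem.Set.add P).filter (fun p => p.1 == i)).map (fun p => p.2) := by
  induction L generalizing rn P with
  | nil => exact ⟨rfl, hrel⟩
  | cons p t ih =>
    have hc : rn.contains p.1 = true := hK p (by simp)
    rw [PySem.Dict.contains_eq_isSome_get?] at hc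
    obtain ⟨st, hst⟩ := Option.isSome_iff_exists.mp hc
    have hstv : rn.getD p.1 PySem.Set.empty = st := PySem.Dict.getD_of_get?_eq_some rn _ hst
    have hmemst : p.2 ∈ st ↔ p ∈ P := by
      rw [← hstv, hrel p.1]
      constructor
      · intro hm
        obtain ⟨q, hq, hq2⟩ := List.mem_map.mp hm
        obtain ⟨hqP, hq1⟩ := List.mem_filter.mp hq
        have : q = p := Prod.ext (by simpa using hq1) hq2
        exact this ▸ hqP
      · intro hm
        exact List.mem_map.mpr ⟨p, List.mem_filter.mpr ⟨hm, by simp⟩, rfl⟩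
    rw [List.foldl_cons, hst]
    have hcontains : rn.contains p.1 = true := by
      rw [PySem.Dict.contains_eq_isSome_get?, hst]
      rfl
    obtain ⟨ihk, ihg⟩ := ih (rn.insert p.1 (PySem.Set.add st p.2)) (PySem.Set.add P p)
      (fun q hq => by
        rw [PySem.Dict.contains_insert]
        simp [hK q (by simp [hq])])
      (fun i => by
        rw [PySem.Dict.getD_insert]
        by_cases hip : i = p.1
        · rw [if_pos hip, hip]
          have hstmap : st = (P.filter (fun q => q.1 == p.1)).map (fun q => q.2) := by
            rw [← hstv, hrel p.1]
          by_cases hpP : p ∈ P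
          · rw [PySem.Set.add_of_mem hpP, PySem.Set.add_of_mem (hmemst.mpr hpP), hstmap]
          · rw [PySem.Set.add_of_not_mem hpP,
              PySem.Set.add_of_not_mem (fun hm => hpP (hmemst.mp hm)),
              List.filter_append, List.map_append, hstmap]
            simp
        · rw [if_neg hip]
          by_cases hpP : p ∈ P
          · rw [PySem.Set.add_of_mem hpP, hrel i]
          · rw [PySem.Set.add_of_not_mem hpP, List.filter_append, List.map_append, hrel i]
            have hne : (p.1 == i) = false := beq_eq_false_iff_ne.mpr (fun e => hip e.symm)
            simp [hne])
    refine ⟨?_, ihg⟩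
    rw [ihk]
    exact PySem.Dict.keys_insert_of_contains rn _ hcontains

-- A's nested counting loop, one reporter at a time
theorem pv_rc_outer (ids : List String) (f : String → List String)
    (rc : PySem.Dict String Int) (b : String)
    (hd : ∀ id ∈ ids, ∀ n ∈ f id, rc.contains n = true) :
    (ids.foldl (fun rc id => (f id).foldl (fun rc n =>
        match rc.get? n with
        | some v => rc.insert n (v + 1)
        | none => rc) rc) rc).getD b 0
      = rc.getD b 0 + ((ids.map (fun id => ((f id).count b : Int))).sum) := by
  induction ids generalizing rc with
  | nil => simp
  | cons id t ih =>
    rw [List.foldl_cons,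
      ih _ (fun j hj n hn => by
        rw [pv_incr_contains]
        exact hd j (by simp [hj]) n hn),
      pv_incr_fold' (f id) rc b (hd id (by simp))]
    simp only [List.map_cons, List.sum_cons]
    ring

-- summing per-reporter counts over distinct reporters counts the whole pair set
theorem pv_partition (ids : List String) (P : List (String × String)) (b : String)
    (hnd : ids.Nodup) (hP : ∀ p ∈ P, p.1 ∈ ids) :
    ((ids.map (fun i => (((P.filter (fun p => p.1 == i)).map (fun p => p.2)).count b : Int))).sum)
      = (P.countP (fun p => p.2 == b) : Int) := by
  induction P with
  | nil => simp
  | cons p t ih =>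
    have ht : ∀ q ∈ t, q.1 ∈ ids := fun q hq => hP q (by simp [hq])
    rw [List.countP_cons]
    by_cases hb : p.2 = b
    · have hsplit : ∀ i ∈ ids,
          ((((p :: t).filter (fun q => q.1 == i)).map (fun q => q.2)).count b : Int)
            = (if (i == p.1) = true then (1 : Int) else 0)
              + (((t.filter (fun q => q.1 == i)).map (fun q => q.2)).count b : Int) := by
        intro i _
        by_cases h1 : p.1 = i
        · rw [List.filter_cons, if_pos (by simp [h1]), List.map_cons, List.count_cons]
          simp [h1, hb]
          ring
        · rw [List.filter_cons, if_neg (by simp [h1])]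
          have : (i == p.1) = false := beq_eq_false_iff_ne.mpr (fun e => h1 e.symm)
          simp [this]
      rw [List.map_eq_map_iff.mpr hsplit, PySem.List.sum_map_add_int,
        PySem.List.sum_map_ite_one_zero,
        show List.countP (fun i => i == p.1) ids = ids.count p.1 from (by rw [List.count]),
        List.count_eq_one_of_mem hnd (hP p (by simp)), ih ht]
      simp [hb]
      ring
    · have hsplit : ∀ i ∈ ids,
          ((((p :: t).filter (fun q => q.1 == i)).map (fun q => q.2)).count b : Int)
            = (((t.filter (fun q => q.1 == i)).map (fun q => q.2)).count b : Int) := by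
        intro i _
        by_cases h1 : p.1 = i
        · rw [List.filter_cons, if_pos (by simp [h1]), List.map_cons, List.count_cons]
          simp [hb]
        · rw [List.filter_cons, if_neg (by simp [h1])]
      rw [List.map_eq_map_iff.mpr hsplit, ih ht]
      have : (p.2 == b) = false := beq_eq_false_iff_ne.mpr hb
      simp [this]

theorem pv_A_eq (id_list report : List String) (k : Int)
    (h : Pre_solution id_list report k) :
    solution id_list report k = (PySem.Set.ofList id_list).map (pvAns report k) := by
  have hmem := pv_memP id_list report k h
  simp only [solution]
  rw [PySem.List.foldl_prod_mk
    (f := fun (d : PySem.Dict String (PySem.Set String)) id => d.insert id PySem.Set.empty)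
    (g := fun (d : PySem.Dict String Int) id => d.insert id 0)]
  simp only
  rw [PySem.List.foldl_congr_mem report _ (fun rn s =>
      match rn.get? (pvParse s).1 with
      | some st => rn.insert (pvParse s).1 (PySem.Set.add st (pvParse s).2)
      | none => rn) _ (by
        intro acc x hx
        obtain ⟨t, hs, -, -⟩ := pv_parse_spec x (h x hx).1
        rw [hs])]
  rw [← List.foldl_map (f := pvParse)
    (g := fun (rn : PySem.Dict String (PySem.Set String)) (p : String × String) =>
      match rn.get? p.1 with
      | some st => rn.insert p.1 (PySem.Set.add st p.2)
      | none => rn)]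
  have hKinit : ∀ p ∈ report.map pvParse,
      (id_list.foldl (fun (d : PySem.Dict String (PySem.Set String)) i =>
        d.insert i PySem.Set.empty) PySem.Dict.empty).contains p.1 = true := by
    intro p hp
    rw [pv_init_contains PySem.Set.empty id_list p.1]
    exact decide_eq_true (hmem p (by rw [pvP, PySem.Set.mem_ofList]; exact hp)).1
  have hrel0 : ∀ i,
      (id_list.foldl (fun (d : PySem.Dict String (PySem.Set String)) i =>
        d.insert i PySem.Set.empty) PySem.Dict.empty).getD i PySem.Set.empty
      = (([] : PySem.Set (String × String)).filter (fun p => p.1 == i)).map (fun p => p.2) := by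
    intro i
    rw [pv_init_getD PySem.Set.empty PySem.Set.empty id_list i]
    split_ifs <;> rfl
  obtain ⟨hkeys, hgd⟩ := pv_rn_fold (report.map pvParse) _ [] hKinit hrel0
  have hgd' : ∀ i, ((report.map pvParse).foldl (fun rn p =>
      match rn.get? p.1 with
      | some st => rn.insert p.1 (PySem.Set.add st p.2)
      | none => rn)
      (id_list.foldl (fun (d : PySem.Dict String (PySem.Set String)) i =>
        d.insert i PySem.Set.empty) PySem.Dict.empty)).getD i PySem.Set.empty
      = ((pvP report).filter (fun p => p.1 == i)).map (fun p => p.2) := by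
    intro i
    rw [hgd i, pvP, PySem.Set.ofList_eq_foldl]
  have hkeys' : ((report.map pvParse).foldl (fun rn p =>
      match rn.get? p.1 with
      | some st => rn.insert p.1 (PySem.Set.add st p.2)
      | none => rn)
      (id_list.foldl (fun (d : PySem.Dict String (PySem.Set String)) i =>
        d.insert i PySem.Set.empty) PySem.Dict.empty)).keys = PySem.Set.ofList id_list := by
    rw [hkeys, pv_init_keys PySem.Set.empty id_list]
  rw [hkeys']
  have hrc : ∀ b ∈ id_list,
      ((PySem.Set.ofList id_list).foldl (fun rc id => (((report.map pvParse).foldl (fun rn p =>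
          match rn.get? p.1 with
          | some st => rn.insert p.1 (PySem.Set.add st p.2)
          | none => rn)
          (id_list.foldl (fun (d : PySem.Dict String (PySem.Set String)) i =>
            d.insert i PySem.Set.empty) PySem.Dict.empty)).getD id PySem.Set.empty).foldl
          (fun rc name =>
            match rc.get? name with
            | some v => rc.insert name (v + 1)
            | none => rc) rc)
        (id_list.foldl (fun (d : PySem.Dict String Int) i => d.insert i 0)
          PySem.Dict.empty)).getD b 0 = (pvTot report b : Int) := by
    intro b hb
    rw [pv_rc_outer (PySem.Set.ofList id_list) _ _ b (by
      intro j hj n hn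
      rw [hgd' j] at hn
      obtain ⟨p, hp, hp2⟩ := List.mem_map.mp hn
      have hpP : p ∈ pvP report := (List.mem_filter.mp hp).1
      rw [pv_init_contains 0 id_list n]
      exact decide_eq_true (hp2 ▸ (hmem p hpP).2))]
    rw [pv_init_getD 0 0 id_list b, if_pos hb, zero_add]
    rw [List.map_eq_map_iff.mpr (fun j _ => by rw [hgd' j])]
    exact pv_partition (PySem.Set.ofList id_list) (pvP report) b
      (PySem.Set.nodup_ofList id_list)
      (fun p hp => (PySem.Set.mem_ofList id_list p.1).mpr (hmem p hp).1)
  rw [PySem.List.foldl_append_singleton_eq_map, List.nil_append]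
  apply List.map_eq_map_iff.mpr
  intro i hi
  rw [PySem.List.foldl_ite_add_one, zero_add, hgd' i, List.countP_map, List.countP_filter]
  rw [pvAns]
  congr 1
  apply pv_countP_congr
  intro p hp
  rw [Bool.and_comm]
  congr 1
  simp only [Function.comp]
  rw [hrc p.2 (hmem p hp).2]

-- B-SIDE LEMMAS ------------------------------------------------------------

-- deduplicating the f-projection of the q-slice of L counts the q-pairs of the dedup of L,
-- provided f is injective on the q-slice
theorem pv_dedup_len (L : List (String × String)) (q : String × String → Bool)
    (f : String × String → String)
    (hf : ∀ p, ∀ p', q p = true → q p' = true → f p = f p' → p = p') :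
    (PySem.Set.ofList ((L.filter q).map f)).length = (PySem.Set.ofList L).countP q := by
  have hS : (PySem.Set.ofList ((L.filter q).map f)).Nodup :=
    PySem.Set.nodup_ofList _
  have hXfilter : ((PySem.Set.ofList L).filter q).Nodup :=
    (PySem.Set.nodup_ofList L).filter q
  have hX : (((PySem.Set.ofList L).filter q).map f).Nodup := by
    refine hXfilter.map_on ?_
    intro x hx y hy hxy
    exact hf x y (List.mem_filter.mp hx).2 (List.mem_filter.mp hy).2 hxy
  have hmem : ∀ a, a ∈ PySem.Set.ofList ((L.filter q).map f)
      ↔ a ∈ ((PySem.Set.ofList L).filter q).map f := by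
    intro a
    rw [PySem.Set.mem_ofList]
    simp only [List.mem_map, List.mem_filter, PySem.Set.mem_ofList]
  rw [((List.perm_ext_iff_of_nodup hS hX).mpr hmem).length_eq,
    List.length_map, ← List.countP_eq_length_filter]

-- under Pre_, a token-level filter-and-project over report is the pair-level one over report.map pvParse
theorem pv_raw_eq (id_list report : List String) (k : Int)
    (_h : Pre_solution id_list report k)
    (q : String × String → Bool) (f : String × String → String)
    (qr : String → Bool) (fr : String → String)
    (hq : ∀ r ∈ report, qr r = q (pvParse r))
    (hfr : ∀ r ∈ report, fr r = f (pvParse r)) :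
    (report.filter qr).map fr = ((report.map pvParse).filter q).map f := by
  rw [List.filter_congr hq, List.filter_map, List.map_map]
  apply List.map_congr_left
  intro r hr
  exact hfr r (List.mem_filter.mp hr).1

theorem pv_B_eq (id_list report : List String) (k : Int)
    (h : Pre_solution id_list report k) :
    solution_alt id_list report k = (PySem.Set.ofList id_list).map (pvAns report k) := by
  have hmem := pv_memP id_list report k h
  have htok : ∀ r ∈ report, pvTok0 r = (pvParse r).1 ∧ pvTok1 r = (pvParse r).2 := by
    intro r hr
    obtain ⟨t, -, e0, e1⟩ := pv_parse_spec r (h r hr).1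
    exact ⟨e0, e1⟩
  simp only [solution_alt]
  -- the distinct-reporters count for a fixed user u
  have hrep : ∀ u : String,
      (PySem.Set.ofList ((report.filter (fun r => pvTok1 r == u)).map pvTok0)).length
        = pvTot report u := by
    intro u
    rw [pv_raw_eq id_list report k h (fun p => p.2 == u) (fun p => p.1)
      (fun r => pvTok1 r == u) pvTok0
      (fun r hr => by simp only [(htok r hr).2])
      (fun r hr => by simp only [(htok r hr).1])]
    rw [pv_dedup_len (report.map pvParse) (fun p => p.2 == u) (fun p => p.1)
      (fun p p' hp hp' hf => by
        apply Prod.ext hf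
        rw [eq_of_beq hp, eq_of_beq hp'])]
    rfl
  -- the banned list is the ids with at least k distinct reporters
  have hban : (PySem.Set.ofList id_list).filter (fun u =>
      decide (k ≤ ((PySem.Set.ofList
        ((report.filter (fun r => pvTok1 r == u)).map pvTok0)).length : Int)))
      = (PySem.Set.ofList id_list).filter (fun u => decide (k ≤ (pvTot report u : Int))) := by
    apply List.filter_congr
    intro u _
    rw [hrep u]
  rw [hban]
  apply List.map_eq_map_iff.mpr
  intro i hi
  rw [pv_raw_eq id_list report k h
    (fun p => p.1 == i && ((PySem.Set.ofList id_list).filter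
        (fun u => decide (k ≤ (pvTot report u : Int)))).contains p.2)
    (fun p => p.2)
    (fun r => pvTok0 r == i && ((PySem.Set.ofList id_list).filter
        (fun u => decide (k ≤ (pvTot report u : Int)))).contains (pvTok1 r))
    pvTok1
    (fun r hr => by simp only [(htok r hr).1, (htok r hr).2])
    (fun r hr => by simp only [(htok r hr).2])]
  rw [pv_dedup_len (report.map pvParse)
    (fun p => p.1 == i && ((PySem.Set.ofList id_list).filter
        (fun u => decide (k ≤ (pvTot report u : Int)))).contains p.2)
    (fun p => p.2)
    (fun p p' hp hp' hf => by
      apply Prod.ext _ hf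
      rw [eq_of_beq (Bool.and_elim_left hp), eq_of_beq (Bool.and_elim_left hp')])]
  rw [pvAns]
  congr 1
  apply pv_countP_congr
  intro p hp
  congr 1
  have hp2 : p.2 ∈ PySem.Set.ofList id_list :=
    (PySem.Set.mem_ofList id_list p.2).mpr (hmem p hp).2
  by_cases hk : k ≤ (pvTot report p.2 : Int)
  · have : p.2 ∈ (PySem.Set.ofList id_list).filter
        (fun u => decide (k ≤ (pvTot report u : Int))) :=
      List.mem_filter.mpr ⟨hp2, decide_eq_true hk⟩
    simp [this, hk]
  · have : p.2 ∉ (PySem.Set.ofList id_list).filter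
        (fun u => decide (k ≤ (pvTot report u : Int))) := by
      intro hmemf
      exact hk (of_decide_eq_true (List.mem_filter.mp hmemf).2)
    simp [this, hk]

-- ===== VERDICT (by name: the statement is the Claim_ definition above) =====
theorem solution_spec : Claim_equal_solution := by
  intro id_list report k _hdom hpre
  unfold Spec_solution
  rw [pv_A_eq id_list report k hpre, pv_B_eq id_list report k hpre]
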